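-- pv_equiv track=rewrite | github.com/Steelx86/ProjectEulerSolutions | solved/problem_11.py | find_max_line
-- ===== SOURCE A (Python) =====
-- from math import prod
--
-- def find_max_line(grid: list) -> int:
--     max_product = 0
--     grid_size = len(grid)
--
--     # right
--     for i in range(grid_size):
--         for j in range(grid_size - 3):
--             product = prod(grid[i][j : j + 4])
--             if product > max_product: max_product = product
--
--     # diagonal right
--     for i in range(grid_size - 3):
--         for j in range(grid_size - 3):
--             product = prod([grid[i + k][j + k] for k in range(4)])
--             if product > max_product: max_product = product
--
--     # down
--     for i in range(grid_size - 3):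
--         for j in range(grid_size):
--             product = prod([grid[i + k][j] for k in range(4)])
--             if product > max_product: max_product = product
--
--     # diagonal left
--     for i in range(grid_size - 3):
--         for j in range(3, grid_size):
--             product = prod([grid[i + k][j - k] for k in range(4)])
--             if product > max_product: max_product = product
--
--     return max_product
-- ===== SOURCE B (Python) =====
-- def _best4(line, best):
--     for s in range(len(line) - 3):
--         p = line[s] * line[s + 1] * line[s + 2] * line[s + 3]
--         if p > best:
--             best = p
--     return best
--
--
-- def find_max_line(grid: list) -> int:
--     n = len(grid)
--     if n < 4:
--         return 0
--     sq = [row[:n] for row in grid]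
--     lines = list(sq)
--     lines += [[sq[i][j] for i in range(n)] for j in range(n)]
--     lines += [[sq[i][i - d] for i in range(max(0, d), min(n, n + d))]
--               for d in range(-(n - 1), n)]
--     lines += [[sq[i][s - i] for i in range(max(0, s - n + 1), min(n, s + 1))]
--               for s in range(2 * n - 1)]
--     best = 0
--     for line in lines:
--         best = _best4(line, best)
--     return best
-- ===== Notes on version B (the rewrite author's own statement) =====
-- stated objective: alternative
-- what changed: A scans the 2-D grid with four direction-specific double loop nests; B first materialises every line of the n-by-n square (rows, columns, both diagonal families) as 1-D lists and then applies one generic sliding-window 'best product of 4 consecutive' routine to each line.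
import Mathlib
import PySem

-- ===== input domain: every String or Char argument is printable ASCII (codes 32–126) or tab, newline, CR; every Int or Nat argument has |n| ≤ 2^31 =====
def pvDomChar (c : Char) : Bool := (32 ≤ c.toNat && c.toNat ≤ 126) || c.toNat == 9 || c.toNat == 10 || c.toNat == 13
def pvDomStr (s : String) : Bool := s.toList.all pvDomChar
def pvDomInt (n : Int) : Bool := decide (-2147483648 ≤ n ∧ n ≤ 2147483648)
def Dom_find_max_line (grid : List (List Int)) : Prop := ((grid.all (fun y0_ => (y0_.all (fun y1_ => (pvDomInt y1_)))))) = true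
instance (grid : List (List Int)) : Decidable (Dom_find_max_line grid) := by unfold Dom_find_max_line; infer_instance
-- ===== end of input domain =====

-- B replaces A's four direction-specific double loop nests by first materialising every line of
-- the n×n square (rows, columns, both diagonal families) as 1-D lists and then running one
-- generic sliding-window "best product of 4 consecutive" routine over each line (objective: alternative).

-- grid[i][j] (both indices known in range wherever the ports use it)
def pvIx (grid : List (List Int)) (i j : Int) : Int :=
  PySem.List.pyGetD (PySem.List.pyGetD grid i []) j 0

-- ===== PORT A =====
def find_max_line (grid : List (List Int)) : Int :=
  let grid_size : Int := (grid.length : Int)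
  -- right
  let m1 := (PySem.List.pyRange 0 grid_size 1).foldl (fun acc i =>
    (PySem.List.pyRange 0 (grid_size - 3) 1).foldl (fun acc j =>
      let product := (PySem.List.slice (PySem.List.pyGetD grid i []) (some j) (some (j + 4))).foldl (· * ·) 1
      if product > acc then product else acc) acc) 0
  -- diagonal right
  let m2 := (PySem.List.pyRange 0 (grid_size - 3) 1).foldl (fun acc i =>
    (PySem.List.pyRange 0 (grid_size - 3) 1).foldl (fun acc j =>
      let product := ((PySem.List.pyRange 0 4 1).map (fun k => pvIx grid (i + k) (j + k))).foldl (· * ·) 1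
      if product > acc then product else acc) acc) m1
  -- down
  let m3 := (PySem.List.pyRange 0 (grid_size - 3) 1).foldl (fun acc i =>
    (PySem.List.pyRange 0 grid_size 1).foldl (fun acc j =>
      let product := ((PySem.List.pyRange 0 4 1).map (fun k => pvIx grid (i + k) j)).foldl (· * ·) 1
      if product > acc then product else acc) acc) m2
  -- diagonal left
  (PySem.List.pyRange 0 (grid_size - 3) 1).foldl (fun acc i =>
    (PySem.List.pyRange 3 grid_size 1).foldl (fun acc j =>
      let product := ((PySem.List.pyRange 0 4 1).map (fun k => pvIx grid (i + k) (j - k))).foldl (· * ·) 1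
      if product > acc then product else acc) acc) m3

-- ===== PORT B =====
-- _best4: best product of 4 consecutive entries of one line, folded into a running best
def pvBest4 (line : List Int) (best : Int) : Int :=
  (PySem.List.pyRange 0 ((line.length : Int) - 3) 1).foldl
    (fun best s =>
      let p := PySem.List.pyGetD line s 0 * PySem.List.pyGetD line (s + 1) 0 *
               PySem.List.pyGetD line (s + 2) 0 * PySem.List.pyGetD line (s + 3) 0
      if p > best then p else best) best

def find_max_line_alt (grid : List (List Int)) : Int :=
  let n : Int := (grid.length : Int)
  if n < 4 then 0 else
  let sq := grid.map (fun row => PySem.List.slice row none (some n))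
  let lines := sq
    ++ (PySem.List.pyRange 0 n 1).map (fun j =>
         (PySem.List.pyRange 0 n 1).map (fun i =>
           PySem.List.pyGetD (PySem.List.pyGetD sq i []) j 0))
    ++ (PySem.List.pyRange (-(n - 1)) n 1).map (fun d =>
         (PySem.List.pyRange (max 0 d) (min n (n + d)) 1).map (fun i =>
           PySem.List.pyGetD (PySem.List.pyGetD sq i []) (i - d) 0))
    ++ (PySem.List.pyRange 0 (2 * n - 1) 1).map (fun c =>
         (PySem.List.pyRange (max 0 (c - n + 1)) (min n (c + 1)) 1).map (fun i =>
           PySem.List.pyGetD (PySem.List.pyGetD sq i []) (c - i) 0))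
  lines.foldl (fun best line => pvBest4 line best) 0

-- ===== PRECONDITION & SPEC =====
-- Pre_ excludes exactly the inputs where Python A raises IndexError: a grid with at least 4 rows
-- some of whose rows are shorter than the number of rows (A indexes grid[r][c] for c up to len(grid)-1).
def Pre_find_max_line (grid : List (List Int)) : Prop :=
  4 ≤ grid.length → ∀ row ∈ grid, grid.length ≤ row.length
instance (grid : List (List Int)) : Decidable (Pre_find_max_line grid) := by
  unfold Pre_find_max_line; infer_instance

def pvWitness_find_max_line : List (List Int) :=
  [[1, 2, 3, 4], [5, 6, 7, 8], [9, 1, 2, 3], [4, 5, 6, 7]]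

def Spec_find_max_line (grid : List (List Int)) (out : Int) : Prop := out = find_max_line_alt grid
instance (grid : List (List Int)) (out : Int) : Decidable (Spec_find_max_line grid out) := by
  unfold Spec_find_max_line; infer_instance

-- ===== CLAIM (what is proved, stated in full; the proofs are below) =====
def Claim_equal_find_max_line : Prop := ∀ (grid : List (List Int)), Dom_find_max_line grid → Pre_find_max_line grid → Spec_find_max_line grid (find_max_line grid)

-- ===== LEMMAS AND PROOFS =====

-- the four products, indexed by their top-left / top-right cell
def pvH (g : List (List Int)) (i j : Int) : Int :=
  pvIx g i j * pvIx g i (j + 1) * pvIx g i (j + 2) * pvIx g i (j + 3)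
def pvV (g : List (List Int)) (i j : Int) : Int :=
  pvIx g i j * pvIx g (i + 1) j * pvIx g (i + 2) j * pvIx g (i + 3) j
def pvDR (g : List (List Int)) (i j : Int) : Int :=
  pvIx g i j * pvIx g (i + 1) (j + 1) * pvIx g (i + 2) (j + 2) * pvIx g (i + 3) (j + 3)
def pvDL (g : List (List Int)) (i j : Int) : Int :=
  pvIx g i j * pvIx g (i + 1) (j - 1) * pvIx g (i + 2) (j - 2) * pvIx g (i + 3) (j - 3)

-- the products A scans, in A's order
def pvLA (g : List (List Int)) : List Int :=
  let n : Int := (g.length : Int)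
  ((PySem.List.pyRange 0 n 1).flatMap fun i => (PySem.List.pyRange 0 (n - 3) 1).map fun j => pvH g i j)
  ++ ((PySem.List.pyRange 0 (n - 3) 1).flatMap fun i => (PySem.List.pyRange 0 (n - 3) 1).map fun j => pvDR g i j)
  ++ ((PySem.List.pyRange 0 (n - 3) 1).flatMap fun i => (PySem.List.pyRange 0 n 1).map fun j => pvV g i j)
  ++ ((PySem.List.pyRange 0 (n - 3) 1).flatMap fun i => (PySem.List.pyRange 3 n 1).map fun j => pvDL g i j)

-- B's square, its lines, and the window products of one line
def pvSq (g : List (List Int)) : List (List Int) :=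
  g.map (fun row => PySem.List.slice row none (some (g.length : Int)))

def pvLines (g : List (List Int)) : List (List Int) :=
  pvSq g
  ++ (PySem.List.pyRange 0 (g.length : Int) 1).map (fun j =>
       (PySem.List.pyRange 0 (g.length : Int) 1).map (fun i =>
         PySem.List.pyGetD (PySem.List.pyGetD (pvSq g) i []) j 0))
  ++ (PySem.List.pyRange (-((g.length : Int) - 1)) (g.length : Int) 1).map (fun d =>
       (PySem.List.pyRange (max 0 d) (min (g.length : Int) ((g.length : Int) + d)) 1).map (fun i =>
         PySem.List.pyGetD (PySem.List.pyGetD (pvSq g) i []) (i - d) 0))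
  ++ (PySem.List.pyRange 0 (2 * (g.length : Int) - 1) 1).map (fun c =>
       (PySem.List.pyRange (max 0 (c - (g.length : Int) + 1)) (min (g.length : Int) (c + 1)) 1).map (fun i =>
         PySem.List.pyGetD (PySem.List.pyGetD (pvSq g) i []) (c - i) 0))

def pvProds (line : List Int) : List Int :=
  (PySem.List.pyRange 0 ((line.length : Int) - 3) 1).map
    (fun s => PySem.List.pyGetD line s 0 * PySem.List.pyGetD line (s + 1) 0 *
              PySem.List.pyGetD line (s + 2) 0 * PySem.List.pyGetD line (s + 3) 0)

theorem pv_maxStep (p acc : Int) : (if p > acc then p else acc) = max acc p := by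
  rw [max_def]; split_ifs <;> omega

theorem pv_foldl_max_flatMap {α : Type} (l : List α) (f : α → List Int) (a : Int) :
    (l.flatMap f).foldl max a = l.foldl (fun acc x => (f x).foldl max acc) a := by
  induction l generalizing a with
  | nil => rfl
  | cons x t ih => simp [List.flatMap_cons, List.foldl_append, ih]

theorem pv_foldl_max_le_iff (l : List Int) (a b : Int) :
    l.foldl max a ≤ b ↔ a ≤ b ∧ ∀ x ∈ l, x ≤ b := by
  induction l generalizing a with
  | nil => simp
  | cons x t ih => simp [List.foldl_cons, ih]; tauto

theorem pv_foldl_max_eq_of_mem_iff (l l' : List Int) (a : Int)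
    (h : ∀ x, x ∈ l ↔ x ∈ l') : l.foldl max a = l'.foldl max a := by
  apply le_antisymm <;> rw [pv_foldl_max_le_iff] <;>
    exact ⟨(PySem.List.le_foldl_max _ _).1,
      fun x hx => (PySem.List.le_foldl_max _ _).2 x (by rw [h] at *; exact hx)⟩

theorem pv_foldl_congr_init {α : Type} (l : List α) (f g : Int → α → Int) (a b : Int)
    (h0 : a = b) (h : ∀ acc : Int, ∀ x ∈ l, f acc x = g acc x) : l.foldl f a = l.foldl g b := by
  subst h0; exact PySem.List.foldl_congr_mem l f g a h

theorem pv_range4 : PySem.List.pyRange 0 4 1 = [0, 1, 2, 3] := by decide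

theorem pv_slice_prod (g : List (List Int)) (hpre : Pre_find_max_line g) (i j : Int)
    (hi0 : 0 ≤ i) (hin : i < (g.length : Int)) (hj0 : 0 ≤ j) (hjn : j < (g.length : Int) - 3) :
    (PySem.List.slice (PySem.List.pyGetD g i []) (some j) (some (j + 4))).foldl (· * ·) 1
      = pvH g i j := by
  obtain ⟨ni, rfl⟩ : ∃ ni : Nat, i = (ni : Int) := ⟨i.toNat, by omega⟩
  obtain ⟨nj, rfl⟩ : ∃ nj : Nat, j = (nj : Int) := ⟨j.toNat, by omega⟩
  have hni : ni < g.length := by exact_mod_cast hin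
  have hrow : PySem.List.pyGetD g (ni : Int) [] = g[ni] := by
    rw [PySem.List.pyGetD_eq_getElem g [] (by omega) hin]; simp
  have hlen : 4 ≤ g.length := by omega
  have hrl : g.length ≤ g[ni].length := hpre hlen _ (List.getElem_mem hni)
  have h4 : nj + 4 ≤ g[ni].length := by omega
  rw [hrow, show ((nj : Int) + 4) = ((nj : Int) + ((4 : Nat) : Int)) by norm_num,
      PySem.List.slice_natCast_add]
  rw [List.drop_eq_getElem_cons (by omega), List.drop_eq_getElem_cons (by omega),
      List.drop_eq_getElem_cons (by omega), List.drop_eq_getElem_cons (by omega)]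
  simp only [List.take_succ_cons, List.take_zero, List.foldl_cons, List.foldl_nil]
  simp only [pvH, pvIx, hrow]
  rw [show ((nj:Int)+1) = ((nj+1 : Nat) : Int) by push_cast; ring,
      show ((nj:Int)+2) = ((nj+2 : Nat) : Int) by push_cast; ring,
      show ((nj:Int)+3) = ((nj+3 : Nat) : Int) by push_cast; ring]
  simp only [PySem.List.pyGetD_natCast]
  rw [List.getD_eq_getElem _ _ (by omega), List.getD_eq_getElem _ _ (by omega),
      List.getD_eq_getElem _ _ (by omega), List.getD_eq_getElem _ _ (by omega)]
  ring

theorem pv_A_eq (g : List (List Int)) (hpre : Pre_find_max_line g) :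
    find_max_line g = (pvLA g).foldl max 0 := by
  simp only [find_max_line, pvLA, List.foldl_append, pv_foldl_max_flatMap, List.foldl_map]
  refine pv_foldl_congr_init _ _ _ _ _ ?_ ?_
  · refine pv_foldl_congr_init _ _ _ _ _ ?_ ?_
    · refine pv_foldl_congr_init _ _ _ _ _ ?_ ?_
      · -- horizontal nest
        refine pv_foldl_congr_init _ _ _ _ _ rfl ?_
        intro acc i hi
        refine pv_foldl_congr_init _ _ _ _ _ rfl ?_
        intro acc j hj
        rw [PySem.List.mem_pyRange_one] at hi hj
        simp only [pv_maxStep]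
        rw [pv_slice_prod g hpre i j hi.1 hi.2 hj.1 hj.2]
      · -- diagonal-right nest
        intro acc i _
        refine pv_foldl_congr_init _ _ _ _ _ rfl ?_
        intro acc j _
        simp only [pv_maxStep]
        congr 1
        simp [pv_range4, pvDR]
    · -- down nest
      intro acc i _
      refine pv_foldl_congr_init _ _ _ _ _ rfl ?_
      intro acc j _
      simp only [pv_maxStep]
      congr 1
      simp [pv_range4, pvV]
  · -- diagonal-left nest
    intro acc i _
    refine pv_foldl_congr_init _ _ _ _ _ rfl ?_
    intro acc j _
    simp only [pv_maxStep]
    congr 1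
    simp [pv_range4, pvDL]

-- ===== B-side lemmas =====

theorem pv_best4_eq (line : List Int) (best : Int) :
    pvBest4 line best = (pvProds line).foldl max best := by
  simp only [pvBest4, pvProds, List.foldl_map, pv_maxStep]

theorem pv_B_eq (g : List (List Int)) (h : ¬ ((g.length : Int) < 4)) :
    find_max_line_alt g = ((pvLines g).flatMap pvProds).foldl max 0 := by
  rw [pv_foldl_max_flatMap]
  simp only [find_max_line_alt]
  rw [if_neg h]
  exact pv_foldl_congr_init (pvLines g) _ _ _ _ rfl (fun acc x _ => pv_best4_eq x acc)

theorem pv_LA_nil (g : List (List Int)) (h : (g.length : Int) < 4) : pvLA g = [] := by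
  have h3 : (g.length : Int) - 3 ≤ 0 := by omega
  simp [pvLA, PySem.List.pyRange_one_eq_nil h3, List.flatMap_eq_nil_iff]

theorem pv_sq_elem (g : List (List Int)) (k : Nat) (hk : k < g.length) :
    PySem.List.pyGetD (pvSq g) (k : Int) [] = (g[k]).take g.length := by
  rw [PySem.List.pyGetD_eq_getElem (pvSq g) [] (by omega) (by simp [pvSq]; exact_mod_cast hk)]
  simp only [pvSq, Int.toNat_natCast, List.getElem_map]
  rw [PySem.List.slice_to _ (by omega : (0:Int) ≤ (g.length : Int))]
  simp

theorem pv_sq_get (g : List (List Int)) (hpre : Pre_find_max_line g) (h4 : 4 ≤ g.length)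
    (i j : Int) (hi0 : 0 ≤ i) (hin : i < (g.length : Int))
    (hj0 : 0 ≤ j) (hjn : j < (g.length : Int)) :
    PySem.List.pyGetD (PySem.List.pyGetD (pvSq g) i []) j 0 = pvIx g i j := by
  obtain ⟨k, rfl⟩ : ∃ k : Nat, i = (k : Int) := ⟨i.toNat, by omega⟩
  have hk : k < g.length := by exact_mod_cast hin
  have hrl : g.length ≤ (g[k]).length := hpre h4 _ (List.getElem_mem hk)
  rw [pv_sq_elem g k hk]
  rw [PySem.List.pyGetD_eq_getElem _ _ hj0 (by simp [List.length_take]; omega)]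
  rw [List.getElem_take]
  unfold pvIx
  rw [PySem.List.pyGetD_eq_getElem g [] (by omega) hin]
  simp only [Int.toNat_natCast]
  rw [PySem.List.pyGetD_eq_getElem _ _ hj0 (by omega)]

theorem pv_prods_eq (line : List Int) (m : Int) (f : Int → Int)
    (hlen : (line.length : Int) = m)
    (hget : ∀ s : Int, 0 ≤ s → s < m → PySem.List.pyGetD line s 0 = f s) :
    pvProds line
      = (PySem.List.pyRange 0 (m - 3) 1).map
          (fun s => f s * f (s + 1) * f (s + 2) * f (s + 3)) := by
  unfold pvProds
  rw [hlen]
  apply List.map_congr_left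
  intro s hs
  rw [PySem.List.mem_pyRange_one] at hs
  rw [hget s hs.1 (by omega), hget (s + 1) (by omega) (by omega),
      hget (s + 2) (by omega) (by omega), hget (s + 3) (by omega) (by omega)]

theorem pv_get_map_range (a b : Int) (f : Int → Int) (s : Int)
    (hs0 : 0 ≤ s) (hsb : s < b - a) :
    PySem.List.pyGetD ((PySem.List.pyRange a b 1).map f) s 0 = f (a + s) := by
  obtain ⟨k, rfl⟩ : ∃ k : Nat, s = (k : Int) := ⟨s.toNat, by omega⟩
  exact PySem.List.pyGetD_map_pyRange_one f a b k 0 (by omega)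

theorem pv_DR_shift (g : List (List Int)) (a d s : Int) :
    pvIx g (a + s) (a + s - d) * pvIx g (a + (s + 1)) (a + (s + 1) - d) *
      pvIx g (a + (s + 2)) (a + (s + 2) - d) * pvIx g (a + (s + 3)) (a + (s + 3) - d)
      = pvDR g (a + s) (a + s - d) := by
  unfold pvDR
  rw [show a + (s + 1) = a + s + 1 from by ring, show a + s + 1 - d = a + s - d + 1 from by ring,
      show a + (s + 2) = a + s + 2 from by ring, show a + s + 2 - d = a + s - d + 2 from by ring,
      show a + (s + 3) = a + s + 3 from by ring, show a + s + 3 - d = a + s - d + 3 from by ring]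

theorem pv_DL_shift (g : List (List Int)) (a c s : Int) :
    pvIx g (a + s) (c - (a + s)) * pvIx g (a + (s + 1)) (c - (a + (s + 1))) *
      pvIx g (a + (s + 2)) (c - (a + (s + 2))) * pvIx g (a + (s + 3)) (c - (a + (s + 3)))
      = pvDL g (a + s) (c - (a + s)) := by
  unfold pvDL
  rw [show a + (s + 1) = a + s + 1 from by ring, show c - (a + s + 1) = c - (a + s) - 1 from by ring,
      show a + (s + 2) = a + s + 2 from by ring, show c - (a + s + 2) = c - (a + s) - 2 from by ring,
      show a + (s + 3) = a + s + 3 from by ring, show c - (a + s + 3) = c - (a + s) - 3 from by ring]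

theorem pv_rows_prods (g : List (List Int)) (hpre : Pre_find_max_line g) (h4 : 4 ≤ g.length)
    (k : Nat) (hk : k < g.length) :
    pvProds (PySem.List.pyGetD (pvSq g) (k : Int) [])
      = (PySem.List.pyRange 0 ((g.length : Int) - 3) 1).map (fun s => pvH g (k : Int) s) := by
  have hrl : g.length ≤ (g[k]).length := hpre h4 _ (List.getElem_mem hk)
  rw [pv_prods_eq _ (g.length : Int) (fun j => pvIx g (k : Int) j)
      (by rw [pv_sq_elem g k hk]; simp [List.length_take]; omega)
      (fun s hs0 hsn => pv_sq_get g hpre h4 (k : Int) s (by omega) (by exact_mod_cast hk) hs0 hsn)]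
  rfl

theorem pv_cols_prods (g : List (List Int)) (hpre : Pre_find_max_line g) (h4 : 4 ≤ g.length)
    (j : Int) (hj0 : 0 ≤ j) (hjn : j < (g.length : Int)) :
    pvProds ((PySem.List.pyRange 0 (g.length : Int) 1).map (fun i =>
        PySem.List.pyGetD (PySem.List.pyGetD (pvSq g) i []) j 0))
      = (PySem.List.pyRange 0 ((g.length : Int) - 3) 1).map (fun s => pvV g s j) := by
  rw [pv_prods_eq _ (g.length : Int) (fun i => pvIx g i j)
      (by simp [PySem.List.length_pyRange_one])
      (fun s hs0 hsn => by
        rw [pv_get_map_range 0 (g.length : Int) _ s hs0 (by omega)]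
        simpa using pv_sq_get g hpre h4 s j hs0 hsn hj0 hjn)]
  rfl

theorem pv_diag_prods (g : List (List Int)) (hpre : Pre_find_max_line g) (h4 : 4 ≤ g.length)
    (d : Int) (hd1 : -((g.length : Int) - 1) ≤ d) (hd2 : d < (g.length : Int)) :
    pvProds ((PySem.List.pyRange (max 0 d) (min (g.length : Int) ((g.length : Int) + d)) 1).map
        (fun i => PySem.List.pyGetD (PySem.List.pyGetD (pvSq g) i []) (i - d) 0))
      = (PySem.List.pyRange 0 (min (g.length : Int) ((g.length : Int) + d) - max 0 d - 3) 1).map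
          (fun s => pvDR g (max 0 d + s) (max 0 d + s - d)) := by
  rw [pv_prods_eq _ (min (g.length : Int) ((g.length : Int) + d) - max 0 d)
      (fun s => pvIx g (max 0 d + s) (max 0 d + s - d))
      (by simp [PySem.List.length_pyRange_one]; omega)
      (fun s hs0 hsn => by
        rw [pv_get_map_range _ _ _ s hs0 (by omega)]
        have := pv_sq_get g hpre h4 (max 0 d + s) (max 0 d + s - d)
          (by omega) (by omega) (by omega) (by omega)
        simpa using this)]
  apply List.map_congr_left
  intro s _
  exact pv_DR_shift g (max 0 d) d s

theorem pv_anti_prods (g : List (List Int)) (hpre : Pre_find_max_line g) (h4 : 4 ≤ g.length)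
    (c : Int) (hc1 : 0 ≤ c) (hc2 : c < 2 * (g.length : Int) - 1) :
    pvProds ((PySem.List.pyRange (max 0 (c - (g.length : Int) + 1)) (min (g.length : Int) (c + 1)) 1).map
        (fun i => PySem.List.pyGetD (PySem.List.pyGetD (pvSq g) i []) (c - i) 0))
      = (PySem.List.pyRange 0
            (min (g.length : Int) (c + 1) - max 0 (c - (g.length : Int) + 1) - 3) 1).map
          (fun s => pvDL g (max 0 (c - (g.length : Int) + 1) + s)
                         (c - (max 0 (c - (g.length : Int) + 1) + s))) := by
  rw [pv_prods_eq _ (min (g.length : Int) (c + 1) - max 0 (c - (g.length : Int) + 1))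
      (fun s => pvIx g (max 0 (c - (g.length : Int) + 1) + s)
                      (c - (max 0 (c - (g.length : Int) + 1) + s)))
      (by simp [PySem.List.length_pyRange_one]; omega)
      (fun s hs0 hsn => by
        rw [pv_get_map_range _ _ _ s hs0 (by omega)]
        have := pv_sq_get g hpre h4 (max 0 (c - (g.length : Int) + 1) + s)
          (c - (max 0 (c - (g.length : Int) + 1) + s))
          (by omega) (by omega) (by omega) (by omega)
        simpa using this)]
  apply List.map_congr_left
  intro s _
  exact pv_DL_shift g (max 0 (c - (g.length : Int) + 1)) c s

theorem pv_sq_getElem_mem (g : List (List Int)) (k : Nat) (hk : k < g.length) :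
    PySem.List.pyGetD (pvSq g) (k : Int) [] ∈ pvSq g := by
  rw [PySem.List.pyGetD_eq_getElem (pvSq g) [] (by omega) (by simp [pvSq]; exact_mod_cast hk)]
  exact List.getElem_mem _

theorem pv_mem_iff (g : List (List Int)) (hpre : Pre_find_max_line g) (h4 : 4 ≤ g.length)
    (x : Int) : x ∈ pvLA g ↔ x ∈ (pvLines g).flatMap pvProds := by
  have hn4 : (4 : Int) ≤ (g.length : Int) := by exact_mod_cast h4
  constructor
  · intro hx
    rw [List.mem_flatMap]
    simp only [pvLA, List.mem_append, List.mem_flatMap, List.mem_map,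
      PySem.List.mem_pyRange_one] at hx
    rcases hx with (((⟨i, hi, j, hj, rfl⟩ | ⟨i, hi, j, hj, rfl⟩) | ⟨i, hi, j, hj, rfl⟩) | ⟨i, hi, j, hj, rfl⟩)
    · -- horizontal
      obtain ⟨k, rfl⟩ : ∃ k : Nat, i = (k : Int) := ⟨i.toNat, by omega⟩
      have hk : k < g.length := by exact_mod_cast hi.2
      refine ⟨PySem.List.pyGetD (pvSq g) (k : Int) [], ?_, ?_⟩
      · unfold pvLines
        exact List.mem_append_left _ (List.mem_append_left _
          (List.mem_append_left _ (pv_sq_getElem_mem g k hk)))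
      · rw [pv_rows_prods g hpre h4 k hk, List.mem_map]
        exact ⟨j, by rw [PySem.List.mem_pyRange_one]; omega, rfl⟩
    · -- diagonal right
      refine ⟨(PySem.List.pyRange (max 0 (i - j)) (min (g.length : Int) ((g.length : Int) + (i - j))) 1).map
          (fun i' => PySem.List.pyGetD (PySem.List.pyGetD (pvSq g) i' []) (i' - (i - j)) 0), ?_, ?_⟩
      · unfold pvLines
        apply List.mem_append_left; apply List.mem_append_right
        rw [List.mem_map]
        exact ⟨i - j, by rw [PySem.List.mem_pyRange_one]; omega, rfl⟩
      · rw [pv_diag_prods g hpre h4 (i - j) (by omega) (by omega), List.mem_map]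
        refine ⟨i - max 0 (i - j), by rw [PySem.List.mem_pyRange_one]; omega, ?_⟩
        show pvDR g (max 0 (i - j) + (i - max 0 (i - j)))
            (max 0 (i - j) + (i - max 0 (i - j)) - (i - j)) = pvDR g i j
        rw [show max 0 (i - j) + (i - max 0 (i - j)) = i from by ring,
            show i - (i - j) = j from by ring]
    · -- down
      refine ⟨(PySem.List.pyRange 0 (g.length : Int) 1).map (fun i' =>
          PySem.List.pyGetD (PySem.List.pyGetD (pvSq g) i' []) j 0), ?_, ?_⟩
      · unfold pvLines
        apply List.mem_append_left; apply List.mem_append_left; apply List.mem_append_right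
        rw [List.mem_map]
        exact ⟨j, by rw [PySem.List.mem_pyRange_one]; omega, rfl⟩
      · rw [pv_cols_prods g hpre h4 j hj.1 hj.2, List.mem_map]
        exact ⟨i, by rw [PySem.List.mem_pyRange_one]; omega, rfl⟩
    · -- diagonal left
      refine ⟨(PySem.List.pyRange (max 0 (i + j - (g.length : Int) + 1)) (min (g.length : Int) (i + j + 1)) 1).map
          (fun i' => PySem.List.pyGetD (PySem.List.pyGetD (pvSq g) i' []) (i + j - i') 0), ?_, ?_⟩
      · unfold pvLines
        apply List.mem_append_right
        rw [List.mem_map]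
        exact ⟨i + j, by rw [PySem.List.mem_pyRange_one]; omega, rfl⟩
      · rw [pv_anti_prods g hpre h4 (i + j) (by omega) (by omega), List.mem_map]
        refine ⟨i - max 0 (i + j - (g.length : Int) + 1), by rw [PySem.List.mem_pyRange_one]; omega, ?_⟩
        show pvDL g (max 0 (i + j - (g.length : Int) + 1) + (i - max 0 (i + j - (g.length : Int) + 1)))
            (i + j - (max 0 (i + j - (g.length : Int) + 1) + (i - max 0 (i + j - (g.length : Int) + 1))))
            = pvDL g i j
        rw [show max 0 (i + j - (g.length : Int) + 1) + (i - max 0 (i + j - (g.length : Int) + 1)) = i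
              from by ring,
            show i + j - i = j from by ring]
  · intro hx
    rw [List.mem_flatMap] at hx
    obtain ⟨line, hline, hx⟩ := hx
    unfold pvLines at hline
    rw [List.mem_append, List.mem_append, List.mem_append] at hline
    simp only [pvLA, List.mem_append, List.mem_flatMap, List.mem_map,
      PySem.List.mem_pyRange_one]
    rcases hline with (((hline | hline) | hline) | hline)
    · -- rows
      obtain ⟨k, hk, rfl⟩ := List.mem_iff_getElem.mp hline
      have hk' : k < g.length := by simpa [pvSq] using hk
      have he : (pvSq g)[k]'hk = PySem.List.pyGetD (pvSq g) (k : Int) [] := by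
        rw [PySem.List.pyGetD_eq_getElem (pvSq g) [] (by omega) (by simp [pvSq]; exact_mod_cast hk')]
        simp
      rw [he, pv_rows_prods g hpre h4 k hk', List.mem_map] at hx
      obtain ⟨s, hs, rfl⟩ := hx
      rw [PySem.List.mem_pyRange_one] at hs
      exact Or.inl (Or.inl (Or.inl ⟨(k : Int), ⟨by omega, by exact_mod_cast hk'⟩, s, ⟨hs.1, hs.2⟩, rfl⟩))
    · -- columns
        rw [List.mem_map] at hline
        obtain ⟨j, hj, rfl⟩ := hline
        rw [PySem.List.mem_pyRange_one] at hj
        rw [pv_cols_prods g hpre h4 j hj.1 hj.2, List.mem_map] at hx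
        obtain ⟨s, hs, rfl⟩ := hx
        rw [PySem.List.mem_pyRange_one] at hs
        exact Or.inl (Or.inr ⟨s, ⟨hs.1, hs.2⟩, j, ⟨hj.1, hj.2⟩, rfl⟩)
    · -- diagonal right
          rw [List.mem_map] at hline
          obtain ⟨d, hd, rfl⟩ := hline
          rw [PySem.List.mem_pyRange_one] at hd
          rw [pv_diag_prods g hpre h4 d hd.1 hd.2, List.mem_map] at hx
          obtain ⟨s, hs, rfl⟩ := hx
          rw [PySem.List.mem_pyRange_one] at hs
          exact Or.inl (Or.inl (Or.inr ⟨max 0 d + s, ⟨by omega, by omega⟩,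
            max 0 d + s - d, ⟨by omega, by omega⟩, rfl⟩))
    · -- diagonal left
          rw [List.mem_map] at hline
          obtain ⟨c, hc, rfl⟩ := hline
          rw [PySem.List.mem_pyRange_one] at hc
          rw [pv_anti_prods g hpre h4 c hc.1 hc.2, List.mem_map] at hx
          obtain ⟨s, hs, rfl⟩ := hx
          rw [PySem.List.mem_pyRange_one] at hs
          exact Or.inr ⟨max 0 (c - (g.length : Int) + 1) + s, ⟨by omega, by omega⟩,
            c - (max 0 (c - (g.length : Int) + 1) + s), ⟨by omega, by omega⟩, rfl⟩

-- ===== VERDICT (by name: the statement is the Claim_ definition above) =====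
theorem find_max_line_spec : Claim_equal_find_max_line := by
  intro g _ hpre
  unfold Spec_find_max_line
  by_cases hlt : (g.length : Int) < 4
  · have hB : find_max_line_alt g = 0 := by simp [find_max_line_alt, hlt]
    rw [hB, pv_A_eq g hpre, pv_LA_nil g hlt]
    rfl
  · have h4 : 4 ≤ g.length := by omega
    rw [pv_A_eq g hpre, pv_B_eq g hlt]
    exact pv_foldl_max_eq_of_mem_iff _ _ _ (pv_mem_iff g hpre h4)
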